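-- pv_equiv track=rewrite | github.com/ASSERT-KTH/Mokav | experiments/pynguin/c4b/return-lst/generated_tests/src_2072/8/src_2072.py | func
-- ===== SOURCE A (Python) =====
-- def func(*args):
-- 	ret_values = []
--
-- 	w = int(args[0])
-- 	x = (w - 1)
-- 	n = 0
-- 	for i in range(1, ((w // 2) + 2)):
-- 	    if (((i % 2) == 0) and ((x % 2) == 0)):
-- 	        ret_values.append('YES')
-- 	        n += 1
-- 	        break
-- 	    x -= 1
-- 	    if (x == 0):
-- 	        break
-- 	if (n == 0):
-- 	    ret_values.append('NO')
--
-- 	return ret_values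
-- ===== SOURCE B (Python) =====
-- def func(*args):
--     w = int(args[0])
--     return ['YES'] if w % 2 == 0 and w >= 4 else ['NO']
-- ===== Notes on version B (the rewrite author's own statement) =====
-- stated objective: simpler
-- what changed: Replaces the decrementing-counter search loop with the closed-form predicate 'w even and w >= 4' that characterises exactly when the loop appends YES.
import Mathlib
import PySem

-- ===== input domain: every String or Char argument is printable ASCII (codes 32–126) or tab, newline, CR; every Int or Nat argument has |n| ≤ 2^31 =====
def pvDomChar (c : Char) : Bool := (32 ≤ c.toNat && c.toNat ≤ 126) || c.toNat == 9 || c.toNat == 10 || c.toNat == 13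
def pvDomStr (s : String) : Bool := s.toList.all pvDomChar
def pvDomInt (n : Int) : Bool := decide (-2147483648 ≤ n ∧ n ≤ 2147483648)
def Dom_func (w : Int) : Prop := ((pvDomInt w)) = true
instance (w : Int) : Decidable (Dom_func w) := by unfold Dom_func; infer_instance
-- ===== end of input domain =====

-- B replaces A's decrement-and-test loop with the closed-form predicate "w even and w ≥ 4"; simpler.

-- ===== PORT A =====
-- the for-loop with its two breaks: state is (x, n); result is (ret_values, n)
def funcLoop : List Int → Int → List String × Int
  | [], _ => ([], 0)
  | i :: rest, x =>
    if PySem.Int.mod i 2 = 0 ∧ PySem.Int.mod x 2 = 0 then (["YES"], 1)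
    else
      let x' := x - 1
      if x' = 0 then ([], 0)
      else funcLoop rest x'

def func (w : Int) : List String :=
  let x := w - 1
  let r := funcLoop (PySem.List.pyRange 1 (PySem.Int.floordiv w 2 + 2) 1) x
  if r.2 = 0 then r.1 ++ ["NO"] else r.1

-- ===== PORT B =====
def func_alt (w : Int) : List String :=
  if PySem.Int.mod w 2 = 0 ∧ 4 ≤ w then ["YES"] else ["NO"]

-- ===== PRECONDITION & SPEC =====
def Spec_func (w : Int) (out : List String) : Prop := out = func_alt w
instance (w : Int) (out : List String) : Decidable (Spec_func w out) := by unfold Spec_func; infer_instance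

-- ===== CLAIM (what is proved, stated in full; the proofs are below) =====
def Claim_equal_func : Prop := ∀ (w : Int), Dom_func w → Spec_func w (func w)

-- ===== LEMMAS AND PROOFS =====

-- On a run of consecutive integers starting at a with x = w - a, if w is odd the
-- YES branch never fires, and if the run stays strictly below w the x = 0 break
-- never fires either: the loop falls through with ([], 0).
lemma funcLoop_odd (w : Int) (hw : w % 2 = 1) :
    ∀ (n : ℕ) (a : Int), 1 ≤ a → a + n < w →
      funcLoop (PySem.List.pyRange a (a + n) 1) (w - a) = ([], 0) := by
  intro n
  induction n with
  | zero =>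
    intro a _ _
    rw [PySem.List.pyRange_one_eq_nil (by omega)]
    rfl
  | succ n ih =>
    intro a ha hlt
    rw [PySem.List.pyRange_one_cons (by push_cast; omega)]
    have hcond : ¬ (PySem.Int.mod a 2 = 0 ∧ PySem.Int.mod (w - a) 2 = 0) := by
      rw [PySem.Int.mod_eq_emod_of_pos (by omega), PySem.Int.mod_eq_emod_of_pos (by omega)]
      omega
    have hx : ¬ (w - a - 1 = 0) := by push_cast at hlt; omega
    simp only [funcLoop, if_neg hcond, if_neg hx]
    have : a + (n + 1 : ℕ) = (a + 1) + (n : ℕ) := by push_cast; ring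
    rw [this]
    have := ih (a + 1) (by omega) (by push_cast at hlt ⊢; omega)
    simpa [show w - a - 1 = w - (a + 1) by ring] using this

lemma func_eq (w : Int) : func w = func_alt w := by
  rcases (by omega : w ≤ -1 ∨ (0 ≤ w ∧ w < 4) ∨ 4 ≤ w) with hneg | hsmall | hbig
  · -- w ≤ -1: the range is empty, both sides give NO
    have hfd : PySem.Int.floordiv w 2 = w / 2 := PySem.Int.floordiv_eq_ediv_of_pos (by omega)
    have hempty : PySem.List.pyRange 1 (PySem.Int.floordiv w 2 + 2) 1 = [] :=
      PySem.List.pyRange_one_eq_nil (by rw [hfd]; omega)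
    simp only [func, hempty, funcLoop]
    simp [func_alt]
    omega
  · -- 0 ≤ w < 4: four concrete values
    have : w = 0 ∨ w = 1 ∨ w = 2 ∨ w = 3 := by omega
    rcases this with h | h | h | h <;> subst h <;> decide
  · -- w ≥ 4
    have hfd : PySem.Int.floordiv w 2 = w / 2 := PySem.Int.floordiv_eq_ediv_of_pos (by omega)
    rcases Int.emod_two_eq_zero_or_one w with heven | hodd
    · -- even w ≥ 4: YES at i = 2
      have hb : (4 : Int) ≤ PySem.Int.floordiv w 2 + 2 := by rw [hfd]; omega
      rw [func, PySem.List.pyRange_one_cons (by omega), PySem.List.pyRange_one_cons (by omega)]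
      have h1 : ¬ (PySem.Int.mod 1 2 = 0 ∧ PySem.Int.mod (w - 1) 2 = 0) := by
        rintro ⟨h, _⟩; revert h; decide
      have hx1 : ¬ (w - 1 - 1 = 0) := by omega
      simp only [funcLoop, if_neg h1, if_neg hx1]
      have d1 : (2 : Int) ∣ w - 1 - 1 := by omega
      have d2 : (2 : Int) ∣ w := by omega
      simp [d1, func_alt, d2, hbig]
    · -- odd w ≥ 4 (hence ≥ 5): the loop falls through, both sides give NO
      have hge : 5 ≤ w := by omega
      obtain ⟨n, hnv⟩ : ∃ n : ℕ, (n : Int) = PySem.Int.floordiv w 2 + 1 :=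
        ⟨(PySem.Int.floordiv w 2 + 1).toNat, by rw [hfd]; omega⟩
      have hrange : PySem.Int.floordiv w 2 + 2 = 1 + (n : Int) := by omega
      rw [func, hrange]
      have hloop := funcLoop_odd w hodd n 1 (by omega) (by rw [hnv, hfd]; omega)
      simp [hloop, func_alt]
      omega

-- ===== VERDICT (by name: the statement is the Claim_ definition above) =====
theorem func_spec : Claim_equal_func := by
  intro w _
  unfold Spec_func
  exact func_eq w
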